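-- pv_equiv track=rewrite | github.com/bravojuandb/python-daily-drills | pillar1/1_core/03_modulo_madness.py | classify_remainders
-- ===== SOURCE A (Python) =====
-- def classify_remainders(values: list[int], divisor: int) -> dict[str, list[int]]:
--     if divisor == 0:
--         raise ValueError("divisor cannot be zero")
--
--     zero = []
--     positive = []
--     negative = []
--
--     for value in values:
--         remainder = value % divisor
--         if remainder == 0:
--             zero.append(value)
--         elif remainder > 0:
--             positive.append(value)
--         else:
--             negative.append(value)
--
--     return {
--         "zero_remainder": zero,
--         "positive_remainder": positive,
--         "negative_remainder": negative,
--     }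
-- ===== SOURCE B (Python) =====
-- def classify_remainders(values: list[int], divisor: int) -> dict[str, list[int]]:
--     if divisor == 0:
--         raise ValueError("divisor cannot be zero")
--     return {
--         "zero_remainder": [v for v in values if v % divisor == 0],
--         "positive_remainder": [v for v in values if v % divisor > 0],
--         "negative_remainder": [v for v in values if v % divisor < 0],
--     }
-- ===== Notes on version B (the rewrite author's own statement) =====
-- stated objective: alternative
-- what changed: The single loop with a three-way branch and three mutable accumulators is replaced by three independent filter passes (list comprehensions), one per sign class; same O(n) cost.
import Mathlib
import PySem

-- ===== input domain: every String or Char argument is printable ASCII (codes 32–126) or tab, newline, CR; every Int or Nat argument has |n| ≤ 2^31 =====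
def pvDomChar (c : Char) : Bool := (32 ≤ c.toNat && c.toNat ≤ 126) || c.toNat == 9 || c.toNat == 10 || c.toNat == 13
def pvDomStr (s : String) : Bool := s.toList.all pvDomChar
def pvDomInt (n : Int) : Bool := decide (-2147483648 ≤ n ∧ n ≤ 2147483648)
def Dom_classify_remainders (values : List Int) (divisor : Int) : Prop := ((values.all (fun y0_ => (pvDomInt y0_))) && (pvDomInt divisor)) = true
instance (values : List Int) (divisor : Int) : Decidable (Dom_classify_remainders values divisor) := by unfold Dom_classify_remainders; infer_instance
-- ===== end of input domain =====

-- B replaces A's single loop with three accumulators by three independent filter passes (one per sign class); same cost, different decomposition.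
-- ===== PORT A =====
def classify_remainders (values : List Int) (divisor : Int) : List (String × List Int) :=
  -- single loop, three accumulators, three-way branch on the remainder
  let st := values.foldl (fun (acc : List Int × List Int × List Int) value =>
    let remainder := PySem.Int.mod value divisor
    if remainder = 0 then (acc.1 ++ [value], acc.2.1, acc.2.2)
    else if remainder > 0 then (acc.1, acc.2.1 ++ [value], acc.2.2)
    else (acc.1, acc.2.1, acc.2.2 ++ [value])) ([], [], [])
  [("zero_remainder", st.1), ("positive_remainder", st.2.1), ("negative_remainder", st.2.2)]

-- ===== PORT B =====
def classify_remainders_alt (values : List Int) (divisor : Int) : List (String × List Int) :=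
  [("zero_remainder", values.filter (fun v => PySem.Int.mod v divisor = 0)),
   ("positive_remainder", values.filter (fun v => PySem.Int.mod v divisor > 0)),
   ("negative_remainder", values.filter (fun v => PySem.Int.mod v divisor < 0))]

-- ===== PRECONDITION & SPEC =====
-- Pre_ excludes exactly divisor = 0, where Python A raises ValueError (and B raises too).
def Pre_classify_remainders (values : List Int) (divisor : Int) : Prop := divisor ≠ 0
instance (values : List Int) (divisor : Int) : Decidable (Pre_classify_remainders values divisor) := by unfold Pre_classify_remainders; infer_instance
def pvWitness_classify_remainders : List Int × Int := ([1, -2, 3, 0], 3)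

def Spec_classify_remainders (values : List Int) (divisor : Int) (out : List (String × List Int)) : Prop := out = classify_remainders_alt values divisor
instance (values : List Int) (divisor : Int) (out : List (String × List Int)) : Decidable (Spec_classify_remainders values divisor out) := by unfold Spec_classify_remainders; infer_instance

-- ===== CLAIM (what is proved, stated in full; the proofs are below) =====
def Claim_equal_classify_remainders : Prop := ∀ (values : List Int) (divisor : Int), Dom_classify_remainders values divisor → Pre_classify_remainders values divisor → Spec_classify_remainders values divisor (classify_remainders values divisor)

-- ===== LEMMAS AND PROOFS =====

-- Loop invariant: the fold extends each accumulator by the corresponding filter.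
theorem classify_fold_inv (divisor : Int) (values : List Int) (z p n : List Int) :
    values.foldl (fun (acc : List Int × List Int × List Int) value =>
      let remainder := PySem.Int.mod value divisor
      if remainder = 0 then (acc.1 ++ [value], acc.2.1, acc.2.2)
      else if remainder > 0 then (acc.1, acc.2.1 ++ [value], acc.2.2)
      else (acc.1, acc.2.1, acc.2.2 ++ [value])) (z, p, n)
    = (z ++ values.filter (fun v => PySem.Int.mod v divisor = 0),
       p ++ values.filter (fun v => PySem.Int.mod v divisor > 0),
       n ++ values.filter (fun v => PySem.Int.mod v divisor < 0)) := by
  induction values generalizing z p n with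
  | nil => simp
  | cons v vs ih =>
    simp only [List.foldl_cons, List.filter_cons]
    by_cases h0 : PySem.Int.mod v divisor = 0
    · simp [h0, ih]
    · by_cases hp : PySem.Int.mod v divisor > 0
      · have : ¬ PySem.Int.mod v divisor < 0 := by omega
        simp [h0, hp, this, ih]
      · have hn : PySem.Int.mod v divisor < 0 := by omega
        simp [h0, hp, hn, ih]

-- ===== VERDICT (by name: the statement is the Claim_ definition above) =====
theorem classify_remainders_spec : Claim_equal_classify_remainders := by
  intro values divisor _ _
  unfold Spec_classify_remainders classify_remainders classify_remainders_alt
  simp [classify_fold_inv]
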